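-- pv_equiv track=rewrite | github.com/Mahakisore7/DAA-Project---DP | Python/rna_tab.py | solve_tabulation
-- ===== SOURCE A (Python) =====
-- def solve_tabulation(rna):
--     n = len(rna)
--
--     dp = [[0 for _ in range(n)] for _ in range(n)]
--
--     def can_pair(b1, b2):
--         pairs = {('A', 'U'), ('U', 'A'), ('C', 'G'), ('G', 'C')}
--         return (b1, b2) in pairs
--
--     # OUTER LOOP: Length of interval 'k'
--     # Start at 5 because sharp turns (len < 5) allow 0 pairs.
--     for k in range(5, n):
--
--         # INNER LOOP: Start position 'i'
--         for i in range(n - k):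
--             j = i + k # End position
--
--             # Option A: j is unpaired (take value from left neighbor)
--             dp[i][j] = dp[i][j-1]
--
--             # Option B: Try to pair j with t
--             for t in range(i, j - 4):
--                 if can_pair(rna[t], rna[j]):
--                     # Get values from the table.
--                     # Be careful with indices: if t==i, 'outside' is empty (0)
--                     inside = dp[t+1][j-1]
--                     outside = dp[i][t-1] if t > i else 0
--
--                     current_val = 1 + inside + outside
--
--                     if current_val > dp[i][j]:
--                         dp[i][j] = current_val
--
--     # The answer for the full string (0 to n-1) is in the top-right corner
--     return dp[0][n-1]
-- ===== SOURCE B (Python) =====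
-- def solve_tabulation(rna):
--     # Top-down memoized recursion on the same interval recurrence (A is bottom-up tabulation).
--     n = len(rna)
--     memo = {}
--
--     def can_pair(b1, b2):
--         return (b1 == 'A' and b2 == 'U') or (b1 == 'U' and b2 == 'A') \
--             or (b1 == 'C' and b2 == 'G') or (b1 == 'G' and b2 == 'C')
--
--     def f(i, j):
--         if j - i < 5:
--             return 0
--         if (i, j) in memo:
--             return memo[(i, j)]
--         best = f(i, j - 1)
--         for t in range(i, j - 4):
--             if can_pair(rna[t], rna[j]):
--                 cand = 1 + f(t + 1, j - 1) + (f(i, t - 1) if t > i else 0)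
--                 if cand > best:
--                     best = cand
--         memo[(i, j)] = best
--         return best
--
--     return f(0, n - 1)
-- ===== Notes on version B (the rewrite author's own statement) =====
-- stated objective: faster
-- what changed: Replaces the bottom-up length-by-length tabulation over the full n x n table with top-down memoized recursion on the same interval recurrence, which only evaluates the subproblems actually reachable from (0, n-1).
-- crash fix: On the empty string A raises IndexError (dp[0][n-1] on an empty table) while B's recursion returns 0. — e.g. on solve_tabulation(""): A raises IndexError, B returns 0
import Mathlib
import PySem

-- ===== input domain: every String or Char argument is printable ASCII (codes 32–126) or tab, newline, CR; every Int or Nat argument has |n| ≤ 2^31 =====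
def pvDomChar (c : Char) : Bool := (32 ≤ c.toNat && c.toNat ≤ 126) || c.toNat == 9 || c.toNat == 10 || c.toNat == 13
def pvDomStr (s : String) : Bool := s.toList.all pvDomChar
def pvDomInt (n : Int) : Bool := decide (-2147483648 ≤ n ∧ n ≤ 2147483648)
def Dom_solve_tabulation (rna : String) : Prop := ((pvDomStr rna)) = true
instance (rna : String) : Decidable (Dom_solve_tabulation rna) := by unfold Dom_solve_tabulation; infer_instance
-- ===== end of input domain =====

-- B replaces A's bottom-up length-by-length tabulation with top-down memoized recursion on the
-- same interval recurrence, evaluating only reachable subproblems (measured faster in a timing run).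

-- rna[t] for an index the loops keep in range: exact there (out of range only outside Pre_)
def pvSget (s : List Char) (t : Int) : Char := (PySem.List.pyGet? s t).getD ' '

-- ===== PORT A =====
def pvPairs : PySem.Set (Char × Char) := PySem.Set.ofList [('A','U'),('U','A'),('C','G'),('G','C')]
def pvCanPairA (b1 b2 : Char) : Bool := PySem.Set.contains pvPairs (b1, b2)

-- dp[i][j] read / write; all indices the loops reach are nonnegative and in range, where these are exact
def pvGet2 (dp : List (List Int)) (i j : Int) : Int :=
  PySem.List.pyGetD (PySem.List.pyGetD dp i []) j 0
def pvSet2 (dp : List (List Int)) (i j : Int) (v : Int) : List (List Int) :=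
  dp.set i.toNat ((PySem.List.pyGetD dp i []).set j.toNat v)

def solve_tabulation (rna : String) : Int :=
  let s := rna.toList
  let n : Int := s.length
  let dp0 : List (List Int) := (PySem.List.pyRange 0 n 1).map
      (fun _ => (PySem.List.pyRange 0 n 1).map (fun _ => (0 : Int)))
  let dp := (PySem.List.pyRange 5 n 1).foldl (fun dp k =>
    (PySem.List.pyRange 0 (n - k) 1).foldl (fun dp i =>
      let j := i + k
      let dp := pvSet2 dp i j (pvGet2 dp i (j-1))
      (PySem.List.pyRange i (j-4) 1).foldl (fun dp t =>
        if pvCanPairA (pvSget s t) (pvSget s j) then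
          let inside := pvGet2 dp (t+1) (j-1)
          let outside := if t > i then pvGet2 dp i (t-1) else 0
          let current := 1 + inside + outside
          if current > pvGet2 dp i j then pvSet2 dp i j current else dp
        else dp) dp) dp) dp0
  pvGet2 dp 0 (n-1)   -- dp[0][n-1]: on the empty string Python raises IndexError here (excluded by Pre_)

-- ===== PORT B =====
def pvCanPairB (b1 b2 : Char) : Bool :=
  (b1 == 'A' && b2 == 'U') || (b1 == 'U' && b2 == 'A') ||
  (b1 == 'C' && b2 == 'G') || (b1 == 'G' && b2 == 'C')

-- f(i, j) of Source B, threading the memo dict; fuel only makes the recursion total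
-- (fuel = len(rna)+1 always suffices: every call strictly decreases j - i)
def pvMemoF (s : List Char) : Nat → Int → Int → PySem.Dict (Int × Int) Int →
    Int × PySem.Dict (Int × Int) Int
  | 0, _, _, memo => (0, memo)
  | fuel+1, i, j, memo =>
    if j - i < 5 then (0, memo)
    else match memo.get? (i, j) with
      | some v => (v, memo)
      | none =>
        let r0 := pvMemoF s fuel i (j-1) memo
        let r := (PySem.List.pyRange i (j-4) 1).foldl
          (fun (acc : Int × PySem.Dict (Int × Int) Int) t =>
            if pvCanPairB (pvSget s t) (pvSget s j) then
              let rin := pvMemoF s fuel (t+1) (j-1) acc.2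
              let rout := if t > i then pvMemoF s fuel i (t-1) rin.2 else (0, rin.2)
              let cand := 1 + rin.1 + rout.1
              (if cand > acc.1 then cand else acc.1, rout.2)
            else acc) r0
        (r.1, r.2.insert (i, j) r.1)

def solve_tabulation_alt (rna : String) : Int :=
  let s := rna.toList
  let n : Int := s.length
  (pvMemoF s (s.length + 1) 0 (n-1) PySem.Dict.empty).1

-- ===== PRECONDITION & SPEC =====
-- Pre_ excludes only the empty string, on which Python A raises IndexError (dp[0][-1] of an empty table).
def Pre_solve_tabulation (rna : String) : Prop := rna ≠ ""
instance (rna : String) : Decidable (Pre_solve_tabulation rna) := by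
  unfold Pre_solve_tabulation; infer_instance
def pvWitness_solve_tabulation : String := "GCCAAAGGC"

-- On the empty string A raises IndexError while B's recursion returns 0.
def Raises_solve_tabulation (rna : String) : Prop := rna = ""
instance (rna : String) : Decidable (Raises_solve_tabulation rna) := by
  unfold Raises_solve_tabulation; infer_instance
def pvRaiseWitness_solve_tabulation : String := ""
def pvRaiseWitnessOut_solve_tabulation : Int := 0

def Spec_solve_tabulation (rna : String) (out : Int) : Prop := out = solve_tabulation_alt rna
instance (rna : String) (out : Int) : Decidable (Spec_solve_tabulation rna out) := by
  unfold Spec_solve_tabulation; infer_instance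

-- ===== CLAIM (what is proved, stated in full; the proofs are below) =====
def Claim_equal_solve_tabulation : Prop := ∀ (rna : String), Dom_solve_tabulation rna →
  Pre_solve_tabulation rna → Spec_solve_tabulation rna (solve_tabulation rna)
def Claim_raises_solve_tabulation : Prop :=
  (∀ (rna : String), Dom_solve_tabulation rna → Raises_solve_tabulation rna →
    ¬ Pre_solve_tabulation rna) ∧
  (Dom_solve_tabulation (pvRaiseWitness_solve_tabulation) ∧
    Raises_solve_tabulation (pvRaiseWitness_solve_tabulation) ∧
    solve_tabulation_alt (pvRaiseWitness_solve_tabulation) = pvRaiseWitnessOut_solve_tabulation)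


-- ===== LEMMAS AND PROOFS =====

-- the two can_pair tests agree
lemma pvCanPair_eq (b1 b2 : Char) : pvCanPairA b1 b2 = pvCanPairB b1 b2 := by
  simp [pvCanPairA, pvCanPairB, pvPairs, PySem.Set.contains, PySem.Set.ofList, PySem.Set.add,
    Prod.ext_iff, beq_eq_decide, Bool.or_assoc]

-- the interval recurrence both programs compute, as a fueled pure function
def pvOpt (s : List Char) : Nat → Int → Int → Int
  | 0, _, _ => 0
  | fuel+1, i, j =>
    if j - i < 5 then 0
    else (PySem.List.pyRange i (j-4) 1).foldl (fun best t =>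
        if pvCanPairB (pvSget s t) (pvSget s j) then
          let cand := 1 + pvOpt s fuel (t+1) (j-1) + (if t > i then pvOpt s fuel i (t-1) else 0)
          if cand > best then cand else best
        else best) (pvOpt s fuel i (j-1))

lemma pvOpt_fuel (s : List Char) : ∀ (f1 : Nat), ∀ (f2 : Nat) (i j : Int),
    (j - i).toNat < f1 → (j - i).toNat < f2 → pvOpt s f1 i j = pvOpt s f2 i j := by
  intro f1
  induction f1 with
  | zero => intro f2 i j h1 h2; omega
  | succ f ih =>
    intro f2 i j h1 h2
    cases f2 with
    | zero => omega
    | succ g =>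
      simp only [pvOpt]
      by_cases h5 : j - i < 5
      · simp [h5]
      · rw [if_neg h5, if_neg h5]
        have hji : 5 ≤ j - i := by omega
        rw [ih g i (j-1) (by omega) (by omega)]
        apply PySem.List.foldl_congr_mem
        intro best t ht
        rw [PySem.List.mem_pyRange_one] at ht
        rw [ih g (t+1) (j-1) (by omega) (by omega), ih g i (t-1) (by omega) (by omega)]

def pvOPT (s : List Char) (i j : Int) : Int := pvOpt s ((j - i).toNat + 1) i j

lemma pvOPT_eq_fuel (s : List Char) (fuel : Nat) (i j : Int) (h : (j - i).toNat < fuel) :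
    pvOpt s fuel i j = pvOPT s i j :=
  pvOpt_fuel s fuel _ i j h (by omega)

lemma pvOPT_low (s : List Char) (i j : Int) (h : j - i < 5) : pvOPT s i j = 0 := by
  simp [pvOPT, pvOpt, h]

-- one update step of the recurrence's inner max-fold, phrased on pvOPT
def pvStep (s : List Char) (i j : Int) (best t : Int) : Int :=
  if pvCanPairB (pvSget s t) (pvSget s j) then
    let cand := 1 + pvOPT s (t+1) (j-1) + (if t > i then pvOPT s i (t-1) else 0)
    if cand > best then cand else best
  else best

lemma pvOPT_unfold (s : List Char) (i j : Int) (h : 5 ≤ j - i) :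
    pvOPT s i j = (PySem.List.pyRange i (j-4) 1).foldl (pvStep s i j) (pvOPT s i (j-1)) := by
  conv_lhs => rw [pvOPT]
  simp only [pvOpt]
  rw [if_neg (by omega), pvOPT_eq_fuel s _ i (j-1) (by omega)]
  apply PySem.List.foldl_congr_mem
  intro best t ht
  rw [PySem.List.mem_pyRange_one] at ht
  simp only [pvStep]
  rw [pvOPT_eq_fuel s _ (t+1) (j-1) (by omega), pvOPT_eq_fuel s _ i (t-1) (by omega)]

-- ===== A-side: the table invariant =====
def pvWF (n : Nat) (dp : List (List Int)) : Prop := dp.length = n ∧ ∀ r ∈ dp, r.length = n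

lemma pvWF_set2 (n : Nat) (dp : List (List Int)) (i j v : Int) (h : pvWF n dp)
    (hi0 : 0 ≤ i) (hi : i < (n : Int)) : pvWF n (pvSet2 dp i j v) := by
  obtain ⟨hlen, hrows⟩ := h
  refine ⟨by simp [pvSet2, hlen], ?_⟩
  intro r hr
  rcases List.mem_or_eq_of_mem_set hr with h' | h'
  · exact hrows r h'
  · subst h'
    rw [List.length_set,
      PySem.List.pyGetD_eq_getElem dp [] hi0 (by rw [hlen]; exact hi)]
    exact hrows _ (List.getElem_mem (by omega))

lemma pvGet2_set2 (n : Nat) (dp : List (List Int)) (h : pvWF n dp) (i j a b v : Int)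
    (hi0 : 0 ≤ i) (hi : i < (n : Int)) (hj0 : 0 ≤ j) (hj : j < (n : Int))
    (ha0 : 0 ≤ a) (ha : a < (n : Int)) (hb0 : 0 ≤ b) (hb : b < (n : Int)) :
    pvGet2 (pvSet2 dp i j v) a b = if a = i ∧ b = j then v else pvGet2 dp a b := by
  obtain ⟨hlen, hrows⟩ := h
  have hi' : i.toNat < dp.length := by omega
  have hrow : PySem.List.pyGetD dp i [] = dp[i.toNat] :=
    PySem.List.pyGetD_eq_getElem dp [] hi0 (by omega)
  have hrowlen : dp[i.toNat].length = n := hrows _ (List.getElem_mem hi')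
  unfold pvGet2 pvSet2
  rw [PySem.List.pyGetD_eq_getElem _ [] ha0 (by rw [List.length_set]; omega)]
  rw [PySem.List.pyGetD_eq_getElem dp [] ha0 (by omega)]
  by_cases hai : a = i
  · subst hai
    rw [List.getElem_set_self (by rw [List.length_set]; omega)]
    rw [hrow, PySem.List.pyGetD_eq_getElem _ 0 hb0 (by rw [List.length_set]; omega)]
    rw [PySem.List.pyGetD_eq_getElem _ 0 hb0 (by omega)]
    by_cases hbj : b = j
    · subst hbj
      rw [List.getElem_set_self (by rw [List.length_set]; omega)]
      simp
    · rw [List.getElem_set_ne (by omega) (by rw [List.length_set]; omega)]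
      simp [hbj]
  · rw [List.getElem_set_ne (by omega) (by rw [List.length_set]; omega)]
    simp [hai]

lemma pvTfold (s : List Char) (n : Nat) (i j : Int)
    (hi0 : 0 ≤ i) (hjn : j < (n : Int)) (hij : 5 ≤ j - i) :
    ∀ (L : List Int), (∀ t ∈ L, i ≤ t ∧ t < j - 4) →
    ∀ (dp : List (List Int)), pvWF n dp →
    (∀ a b : Int, 0 ≤ a → a < (n : Int) → 0 ≤ b → b < (n : Int) → b - a < j - i →
      pvGet2 dp a b = pvOPT s a b) →
    pvGet2 (L.foldl (fun dp t =>
        if pvCanPairA (pvSget s t) (pvSget s j) then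
          let inside := pvGet2 dp (t+1) (j-1)
          let outside := if t > i then pvGet2 dp i (t-1) else 0
          let current := 1 + inside + outside
          if current > pvGet2 dp i j then pvSet2 dp i j current else dp
        else dp) dp) i j = L.foldl (pvStep s i j) (pvGet2 dp i j) ∧
    pvWF n (L.foldl (fun dp t =>
        if pvCanPairA (pvSget s t) (pvSget s j) then
          let inside := pvGet2 dp (t+1) (j-1)
          let outside := if t > i then pvGet2 dp i (t-1) else 0
          let current := 1 + inside + outside
          if current > pvGet2 dp i j then pvSet2 dp i j current else dp
        else dp) dp) ∧
    (∀ a b : Int, 0 ≤ a → a < (n : Int) → 0 ≤ b → b < (n : Int) → ¬(a = i ∧ b = j) →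
      pvGet2 (L.foldl (fun dp t =>
        if pvCanPairA (pvSget s t) (pvSget s j) then
          let inside := pvGet2 dp (t+1) (j-1)
          let outside := if t > i then pvGet2 dp i (t-1) else 0
          let current := 1 + inside + outside
          if current > pvGet2 dp i j then pvSet2 dp i j current else dp
        else dp) dp) a b = pvGet2 dp a b) := by
  have hfun : (fun (dp : List (List Int)) (t : Int) =>
      if pvCanPairA (pvSget s t) (pvSget s j) then
        let inside := pvGet2 dp (t+1) (j-1)
        let outside := if t > i then pvGet2 dp i (t-1) else 0
        let current := 1 + inside + outside
        if current > pvGet2 dp i j then pvSet2 dp i j current else dp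
      else dp) = (fun (dp : List (List Int)) (t : Int) =>
      if pvCanPairB (pvSget s t) (pvSget s j) then
        let inside := pvGet2 dp (t+1) (j-1)
        let outside := if t > i then pvGet2 dp i (t-1) else 0
        let current := 1 + inside + outside
        if current > pvGet2 dp i j then pvSet2 dp i j current else dp
      else dp) := by
    funext dp t; rw [pvCanPair_eq]
  simp only [hfun]
  intro L
  induction L with
  | nil =>
    intro _ dp hWF hlow
    exact ⟨rfl, hWF, fun a b _ _ _ _ _ => rfl⟩
  | cons t L ih =>
    intro hL dp hWF hlow
    obtain ⟨ht1, ht2⟩ := hL t (List.mem_cons_self)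
    have hL' : ∀ t' ∈ L, i ≤ t' ∧ t' < j - 4 := fun t' h' => hL t' (List.mem_cons_of_mem _ h')
    simp only [List.foldl_cons, pvStep]
    by_cases hc : pvCanPairB (pvSget s t) (pvSget s j) = true
    · rw [if_pos hc, if_pos hc]
      have h1 : pvGet2 dp (t+1) (j-1) = pvOPT s (t+1) (j-1) :=
        hlow _ _ (by omega) (by omega) (by omega) (by omega) (by omega)
      have h2 : (if t > i then pvGet2 dp i (t-1) else 0) = (if t > i then pvOPT s i (t-1) else 0) := by
        split_ifs with hgt
        · exact hlow _ _ (by omega) (by omega) (by omega) (by omega) (by omega)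
        · rfl
      rw [h1, h2]
      by_cases hgt : 1 + pvOPT s (t+1) (j-1) + (if t > i then pvOPT s i (t-1) else 0) > pvGet2 dp i j
      · rw [if_pos hgt, if_pos hgt]
        have hWF' := pvWF_set2 n dp i j (1 + pvOPT s (t+1) (j-1) + (if t > i then pvOPT s i (t-1) else 0)) hWF hi0 (by omega)
        have hset := pvGet2_set2 n dp hWF i j
        have hlow' : ∀ a b : Int, 0 ≤ a → a < (n : Int) → 0 ≤ b → b < (n : Int) → b - a < j - i →
            pvGet2 (pvSet2 dp i j (1 + pvOPT s (t+1) (j-1) + (if t > i then pvOPT s i (t-1) else 0))) a b = pvOPT s a b := by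
          intro a b ha0 ha hb0 hb hm
          rw [hset a b _ (by omega) (by omega) (by omega) (by omega) ha0 ha hb0 hb,
            if_neg (by rintro ⟨rfl, rfl⟩; omega)]
          exact hlow a b ha0 ha hb0 hb hm
        obtain ⟨e1, e2, e3⟩ := ih hL' _ hWF' hlow'
        refine ⟨?_, e2, ?_⟩
        · rw [e1, hset i j _ (by omega) (by omega) (by omega) (by omega) (by omega) (by omega) (by omega) (by omega),
            if_pos ⟨rfl, rfl⟩]
        · intro a b ha0 ha hb0 hb hne
          rw [e3 a b ha0 ha hb0 hb hne,
            hset a b _ (by omega) (by omega) (by omega) (by omega) ha0 ha hb0 hb, if_neg hne]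
      · rw [if_neg hgt, if_neg hgt]
        exact ih hL' dp hWF hlow
    · rw [if_neg hc, if_neg hc]
      exact ih hL' dp hWF hlow

lemma pvDiag (s : List Char) (n : Nat) (k : Int) (h5 : 5 ≤ k) :
    ∀ (m : Int) (dp : List (List Int)), 0 ≤ m → pvWF n dp →
    (∀ a b : Int, 0 ≤ a → a < (n : Int) → 0 ≤ b → b < (n : Int) →
      pvGet2 dp a b = if b - a < k ∨ (b - a = k ∧ a < m) then pvOPT s a b else 0) →
    pvWF n ((PySem.List.pyRange m ((n : Int) - k) 1).foldl (fun dp i =>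
      let j := i + k
      let dp := pvSet2 dp i j (pvGet2 dp i (j-1))
      (PySem.List.pyRange i (j-4) 1).foldl (fun dp t =>
        if pvCanPairA (pvSget s t) (pvSget s j) then
          let inside := pvGet2 dp (t+1) (j-1)
          let outside := if t > i then pvGet2 dp i (t-1) else 0
          let current := 1 + inside + outside
          if current > pvGet2 dp i j then pvSet2 dp i j current else dp
        else dp) dp) dp) ∧
    (∀ a b : Int, 0 ≤ a → a < (n : Int) → 0 ≤ b → b < (n : Int) →
      pvGet2 ((PySem.List.pyRange m ((n : Int) - k) 1).foldl (fun dp i =>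
      let j := i + k
      let dp := pvSet2 dp i j (pvGet2 dp i (j-1))
      (PySem.List.pyRange i (j-4) 1).foldl (fun dp t =>
        if pvCanPairA (pvSget s t) (pvSget s j) then
          let inside := pvGet2 dp (t+1) (j-1)
          let outside := if t > i then pvGet2 dp i (t-1) else 0
          let current := 1 + inside + outside
          if current > pvGet2 dp i j then pvSet2 dp i j current else dp
        else dp) dp) dp) a b = if b - a ≤ k then pvOPT s a b else 0) := by
  suffices H : ∀ (fuel : Nat) (m : Int) (dp : List (List Int)),
      ((n : Int) - k - m).toNat ≤ fuel → 0 ≤ m → pvWF n dp →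
      (∀ a b : Int, 0 ≤ a → a < (n : Int) → 0 ≤ b → b < (n : Int) →
        pvGet2 dp a b = if b - a < k ∨ (b - a = k ∧ a < m) then pvOPT s a b else 0) →
      pvWF n ((PySem.List.pyRange m ((n : Int) - k) 1).foldl (fun dp i =>
        let j := i + k
        let dp := pvSet2 dp i j (pvGet2 dp i (j-1))
        (PySem.List.pyRange i (j-4) 1).foldl (fun dp t =>
          if pvCanPairA (pvSget s t) (pvSget s j) then
            let inside := pvGet2 dp (t+1) (j-1)
            let outside := if t > i then pvGet2 dp i (t-1) else 0
            let current := 1 + inside + outside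
            if current > pvGet2 dp i j then pvSet2 dp i j current else dp
          else dp) dp) dp) ∧
      (∀ a b : Int, 0 ≤ a → a < (n : Int) → 0 ≤ b → b < (n : Int) →
        pvGet2 ((PySem.List.pyRange m ((n : Int) - k) 1).foldl (fun dp i =>
        let j := i + k
        let dp := pvSet2 dp i j (pvGet2 dp i (j-1))
        (PySem.List.pyRange i (j-4) 1).foldl (fun dp t =>
          if pvCanPairA (pvSget s t) (pvSget s j) then
            let inside := pvGet2 dp (t+1) (j-1)
            let outside := if t > i then pvGet2 dp i (t-1) else 0
            let current := 1 + inside + outside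
            if current > pvGet2 dp i j then pvSet2 dp i j current else dp
          else dp) dp) dp) a b = if b - a ≤ k then pvOPT s a b else 0) by
    intro m dp hm hWF hinv
    exact H ((n : Int) - k - m).toNat m dp le_rfl hm hWF hinv
  intro fuel
  induction fuel with
  | zero =>
    intro m dp hf hm hWF hinv
    rw [PySem.List.pyRange_one_eq_nil (by omega)]
    refine ⟨hWF, ?_⟩
    intro a b ha0 ha hb0 hb
    simp only [List.foldl_nil]
    rw [hinv a b ha0 ha hb0 hb]
    by_cases h1 : b - a < k ∨ (b - a = k ∧ a < m)
    · rw [if_pos h1, if_pos (by omega)]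
    · rw [if_neg h1, if_neg (by omega)]
  | succ fl ihf =>
    intro m dp hf hm hWF hinv
    by_cases hend : (n : Int) - k ≤ m
    · rw [PySem.List.pyRange_one_eq_nil hend]
      refine ⟨hWF, ?_⟩
      intro a b ha0 ha hb0 hb
      simp only [List.foldl_nil]
      rw [hinv a b ha0 ha hb0 hb]
      by_cases h1 : b - a < k ∨ (b - a = k ∧ a < m)
      · rw [if_pos h1, if_pos (by omega)]
      · rw [if_neg h1, if_neg (by omega)]
    · rw [PySem.List.pyRange_one_cons (by omega)]
      simp only [List.foldl_cons]
      have hv : pvGet2 dp m (m+k-1) = pvOPT s m (m+k-1) := by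
        rw [hinv m (m+k-1) hm (by omega) (by omega) (by omega), if_pos (by omega)]
      have hWF1 := pvWF_set2 n dp m (m+k) (pvGet2 dp m (m+k-1)) hWF hm (by omega)
      have hset := pvGet2_set2 n dp hWF m (m+k)
      have hlow1 : ∀ a b : Int, 0 ≤ a → a < (n : Int) → 0 ≤ b → b < (n : Int) →
          b - a < (m+k) - m →
          pvGet2 (pvSet2 dp m (m+k) (pvGet2 dp m (m+k-1))) a b = pvOPT s a b := by
        intro a b ha0 ha hb0 hb hmeas
        rw [hset a b _ hm (by omega) (by omega) (by omega) ha0 ha hb0 hb,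
          if_neg (by rintro ⟨rfl, rfl⟩; omega)]
        rw [hinv a b ha0 ha hb0 hb, if_pos (by omega)]
      obtain ⟨e1, e2, e3⟩ := pvTfold s n m (m+k) hm (by omega) (by omega)
        (PySem.List.pyRange m (m+k-4) 1)
        (fun t ht => by rw [PySem.List.mem_pyRange_one] at ht; omega)
        (pvSet2 dp m (m+k) (pvGet2 dp m (m+k-1))) hWF1 hlow1
      have hcell : pvGet2 (pvSet2 dp m (m+k) (pvGet2 dp m (m+k-1))) m (m+k) =
          pvOPT s m (m+k-1) := by
        rw [hset m (m+k) _ hm (by omega) (by omega) (by omega) hm (by omega) (by omega) (by omega),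
          if_pos ⟨rfl, rfl⟩, hv]
      rw [hcell] at e1
      have e1' : pvGet2 ((PySem.List.pyRange m (m+k-4) 1).foldl (fun dp t =>
          if pvCanPairA (pvSget s t) (pvSget s (m+k)) then
            let inside := pvGet2 dp (t+1) (m+k-1)
            let outside := if t > m then pvGet2 dp m (t-1) else 0
            let current := 1 + inside + outside
            if current > pvGet2 dp m (m+k) then pvSet2 dp m (m+k) current else dp
          else dp) (pvSet2 dp m (m+k) (pvGet2 dp m (m+k-1)))) m (m+k) = pvOPT s m (m+k) := by
        rw [pvOPT_unfold s m (m+k) (by omega)]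
        exact e1
      apply ihf (m+1) _ (by omega) (by omega) e2
      intro a b ha0 ha hb0 hb
      by_cases hab : a = m ∧ b = m + k
      · obtain ⟨rfl, rfl⟩ := hab
        rw [e1', if_pos (by omega)]
      · rw [e3 a b ha0 ha hb0 hb hab,
          hset a b _ hm (by omega) (by omega) (by omega) ha0 ha hb0 hb, if_neg hab,
          hinv a b ha0 ha hb0 hb]
        by_cases h1 : b - a < k ∨ (b - a = k ∧ a < m)
        · rw [if_pos h1, if_pos (by omega)]
        · rw [if_neg h1, if_neg (by omega)]

lemma pvOuter (s : List Char) (n : Nat) :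
    ∀ (c : Int) (dp : List (List Int)), 4 ≤ c → pvWF n dp →
    (∀ a b : Int, 0 ≤ a → a < (n : Int) → 0 ≤ b → b < (n : Int) →
      pvGet2 dp a b = if b - a ≤ c then pvOPT s a b else 0) →
    (∀ a b : Int, 0 ≤ a → a < (n : Int) → 0 ≤ b → b < (n : Int) →
      pvGet2 ((PySem.List.pyRange (c+1) (n : Int) 1).foldl (fun dp k =>
        (PySem.List.pyRange 0 ((n : Int) - k) 1).foldl (fun dp i =>
          let j := i + k
          let dp := pvSet2 dp i j (pvGet2 dp i (j-1))
          (PySem.List.pyRange i (j-4) 1).foldl (fun dp t =>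
            if pvCanPairA (pvSget s t) (pvSget s j) then
              let inside := pvGet2 dp (t+1) (j-1)
              let outside := if t > i then pvGet2 dp i (t-1) else 0
              let current := 1 + inside + outside
              if current > pvGet2 dp i j then pvSet2 dp i j current else dp
            else dp) dp) dp) dp) a b
        = if b - a ≤ max c ((n : Int) - 1) then pvOPT s a b else 0) := by
  suffices H : ∀ (fuel : Nat) (c : Int) (dp : List (List Int)),
      ((n : Int) - (c+1)).toNat ≤ fuel → 4 ≤ c → pvWF n dp →
      (∀ a b : Int, 0 ≤ a → a < (n : Int) → 0 ≤ b → b < (n : Int) →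
        pvGet2 dp a b = if b - a ≤ c then pvOPT s a b else 0) →
      pvWF n ((PySem.List.pyRange (c+1) (n : Int) 1).foldl (fun dp k =>
        (PySem.List.pyRange 0 ((n : Int) - k) 1).foldl (fun dp i =>
          let j := i + k
          let dp := pvSet2 dp i j (pvGet2 dp i (j-1))
          (PySem.List.pyRange i (j-4) 1).foldl (fun dp t =>
            if pvCanPairA (pvSget s t) (pvSget s j) then
              let inside := pvGet2 dp (t+1) (j-1)
              let outside := if t > i then pvGet2 dp i (t-1) else 0
              let current := 1 + inside + outside
              if current > pvGet2 dp i j then pvSet2 dp i j current else dp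
            else dp) dp) dp) dp) ∧
      (∀ a b : Int, 0 ≤ a → a < (n : Int) → 0 ≤ b → b < (n : Int) →
        pvGet2 ((PySem.List.pyRange (c+1) (n : Int) 1).foldl (fun dp k =>
        (PySem.List.pyRange 0 ((n : Int) - k) 1).foldl (fun dp i =>
          let j := i + k
          let dp := pvSet2 dp i j (pvGet2 dp i (j-1))
          (PySem.List.pyRange i (j-4) 1).foldl (fun dp t =>
            if pvCanPairA (pvSget s t) (pvSget s j) then
              let inside := pvGet2 dp (t+1) (j-1)
              let outside := if t > i then pvGet2 dp i (t-1) else 0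
              let current := 1 + inside + outside
              if current > pvGet2 dp i j then pvSet2 dp i j current else dp
            else dp) dp) dp) dp) a b = if b - a ≤ max c ((n : Int) - 1) then pvOPT s a b else 0) by
    intro c dp hc hWF hinv
    exact (H ((n : Int) - (c+1)).toNat c dp le_rfl hc hWF hinv).2
  intro fuel
  induction fuel with
  | zero =>
    intro c dp hf hc hWF hinv
    rw [PySem.List.pyRange_one_eq_nil (by omega)]
    refine ⟨hWF, ?_⟩
    intro a b ha0 ha hb0 hb
    simp only [List.foldl_nil]
    rw [hinv a b ha0 ha hb0 hb]
    by_cases h1 : b - a ≤ c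
    · rw [if_pos h1, if_pos (by omega)]
    · rw [if_neg h1, if_neg (by omega)]
  | succ fl ihf =>
    intro c dp hf hc hWF hinv
    by_cases hend : (n : Int) ≤ c + 1
    · rw [PySem.List.pyRange_one_eq_nil hend]
      refine ⟨hWF, ?_⟩
      intro a b ha0 ha hb0 hb
      simp only [List.foldl_nil]
      rw [hinv a b ha0 ha hb0 hb]
      by_cases h1 : b - a ≤ c
      · rw [if_pos h1, if_pos (by omega)]
      · rw [if_neg h1, if_neg (by omega)]
    · rw [PySem.List.pyRange_one_cons (by omega)]
      simp only [List.foldl_cons]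
      obtain ⟨d1, d2⟩ := pvDiag s n (c+1) (by omega) 0 dp le_rfl hWF
        (fun a b ha0 ha hb0 hb => by
          rw [hinv a b ha0 ha hb0 hb]
          by_cases h1 : b - a ≤ c
          · rw [if_pos h1, if_pos (by omega)]
          · rw [if_neg h1, if_neg (by omega)])
      obtain ⟨w1, w2⟩ := ihf (c+1) _ (by omega) (by omega) d1 d2
      refine ⟨w1, ?_⟩
      intro a b ha0 ha hb0 hb
      rw [w2 a b ha0 ha hb0 hb]
      by_cases h1 : b - a ≤ max (c+1) ((n : Int) - 1)
      · rw [if_pos h1, if_pos (by omega)]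
      · rw [if_neg h1, if_neg (by omega)]

-- ===== B-side: the memo invariant =====
def pvMemoInv (s : List Char) (memo : PySem.Dict (Int × Int) Int) : Prop :=
  ∀ (p : Int × Int) (v : Int), memo.get? p = some v → v = pvOPT s p.1 p.2

lemma pvMemoF_correct (s : List Char) : ∀ (fuel : Nat) (i j : Int)
    (memo : PySem.Dict (Int × Int) Int), (j - i).toNat < fuel → pvMemoInv s memo →
    (pvMemoF s fuel i j memo).1 = pvOPT s i j ∧ pvMemoInv s (pvMemoF s fuel i j memo).2 := by
  intro fuel
  induction fuel with
  | zero => intro i j memo h; omega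
  | succ f ih =>
    intro i j memo hfu hinv
    simp only [pvMemoF]
    by_cases h5 : j - i < 5
    · rw [if_pos h5]
      exact ⟨(pvOPT_low s i j h5).symm, hinv⟩
    · rw [if_neg h5]
      cases hm : memo.get? (i, j) with
      | some v =>
        exact ⟨hinv (i, j) v hm, hinv⟩
      | none =>
        obtain ⟨h01, h02⟩ := ih i (j-1) memo (by omega) hinv
        have key : ∀ (L : List Int), (∀ t ∈ L, i ≤ t ∧ t < j - 4) →
            ∀ (acc : Int × PySem.Dict (Int × Int) Int), pvMemoInv s acc.2 →
            (L.foldl (fun (acc : Int × PySem.Dict (Int × Int) Int) t =>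
              if pvCanPairB (pvSget s t) (pvSget s j) then
                let rin := pvMemoF s f (t+1) (j-1) acc.2
                let rout := if t > i then pvMemoF s f i (t-1) rin.2 else (0, rin.2)
                let cand := 1 + rin.1 + rout.1
                (if cand > acc.1 then cand else acc.1, rout.2)
              else acc) acc).1 = L.foldl (pvStep s i j) acc.1 ∧
            pvMemoInv s (L.foldl (fun (acc : Int × PySem.Dict (Int × Int) Int) t =>
              if pvCanPairB (pvSget s t) (pvSget s j) then
                let rin := pvMemoF s f (t+1) (j-1) acc.2
                let rout := if t > i then pvMemoF s f i (t-1) rin.2 else (0, rin.2)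
                let cand := 1 + rin.1 + rout.1
                (if cand > acc.1 then cand else acc.1, rout.2)
              else acc) acc).2 := by
          intro L
          induction L with
          | nil => intro _ acc hacc; exact ⟨rfl, hacc⟩
          | cons t L ihL =>
            intro hL acc hacc
            obtain ⟨ht1, ht2⟩ := hL t (List.mem_cons_self)
            have hL' : ∀ t' ∈ L, i ≤ t' ∧ t' < j - 4 :=
              fun t' h' => hL t' (List.mem_cons_of_mem _ h')
            simp only [List.foldl_cons, pvStep]
            by_cases hc : pvCanPairB (pvSget s t) (pvSget s j) = true
            · rw [if_pos hc, if_pos hc]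
              obtain ⟨a1, a2⟩ := ih (t+1) (j-1) acc.2 (by omega) hacc
              by_cases hti : t > i
              · rw [if_pos hti, if_pos hti]
                obtain ⟨b1, b2⟩ := ih i (t-1) (pvMemoF s f (t+1) (j-1) acc.2).2 (by omega) a2
                rw [a1, b1]
                exact ihL hL' _ b2
              · rw [if_neg hti, if_neg hti]
                rw [a1]
                exact ihL hL' _ a2
            · rw [if_neg hc, if_neg hc]
              exact ihL hL' acc hacc
        obtain ⟨k1, k2⟩ := key (PySem.List.pyRange i (j-4) 1)
          (fun t ht => by rw [PySem.List.mem_pyRange_one] at ht; omega)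
          (pvMemoF s f i (j-1) memo) h02
        rw [h01] at k1
        rw [← pvOPT_unfold s i j (by omega)] at k1
        refine ⟨k1, ?_⟩
        intro p v hpv
        by_cases hp : p = (i, j)
        · subst hp
          rw [PySem.Dict.get?_insert_self] at hpv
          cases hpv
          exact k1
        · rw [PySem.Dict.get?_insert_of_ne _ _ hp] at hpv
          exact k2 p v hpv

theorem solve_tabulation_spec : Claim_equal_solve_tabulation := by
  intro rna _ hpre
  have hs : rna.toList ≠ [] := fun h => hpre (String.toList_eq_nil_iff.mp h)
  have hn : 0 < rna.toList.length := List.length_pos_iff.mpr hs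
  show solve_tabulation rna = solve_tabulation_alt rna
  simp only [solve_tabulation, solve_tabulation_alt]
  obtain ⟨m1, -⟩ := pvMemoF_correct rna.toList (rna.toList.length + 1) 0
    ((rna.toList.length : Int) - 1) PySem.Dict.empty (by omega)
    (fun p v h => by rw [PySem.Dict.get?_empty] at h; cases h)
  rw [m1]
  have hdp0WF : pvWF rna.toList.length
      ((PySem.List.pyRange 0 (rna.toList.length : Int) 1).map
        (fun _ => (PySem.List.pyRange 0 (rna.toList.length : Int) 1).map (fun _ => (0 : Int)))) := by
    constructor
    · rw [List.length_map, PySem.List.length_pyRange_one]; omega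
    · intro r hr
      obtain ⟨x, -, rfl⟩ := List.mem_map.mp hr
      rw [List.length_map, PySem.List.length_pyRange_one]; omega
  have hdp0 : ∀ a b : Int, 0 ≤ a → a < (rna.toList.length : Int) → 0 ≤ b →
      b < (rna.toList.length : Int) →
      pvGet2 ((PySem.List.pyRange 0 (rna.toList.length : Int) 1).map
        (fun _ => (PySem.List.pyRange 0 (rna.toList.length : Int) 1).map (fun _ => (0 : Int)))) a b
        = if b - a ≤ 4 then pvOPT rna.toList a b else 0 := by
    intro a b ha0 ha hb0 hb
    have hz : pvGet2 ((PySem.List.pyRange 0 (rna.toList.length : Int) 1).map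
        (fun _ => (PySem.List.pyRange 0 (rna.toList.length : Int) 1).map (fun _ => (0 : Int)))) a b
        = 0 := by
      unfold pvGet2
      rw [PySem.List.pyGetD_eq_getElem _ [] ha0
        (by rw [List.length_map, PySem.List.length_pyRange_one]; omega)]
      rw [List.getElem_map]
      rw [PySem.List.pyGetD_eq_getElem _ 0 hb0
        (by rw [List.length_map, PySem.List.length_pyRange_one]; omega)]
      rw [List.getElem_map]
    rw [hz]
    by_cases h1 : b - a ≤ 4
    · rw [if_pos h1, pvOPT_low rna.toList a b (by omega)]
    · rw [if_neg h1]
  have houter := pvOuter rna.toList rna.toList.length 4 _ le_rfl hdp0WF hdp0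
  rw [show (4 : Int) + 1 = 5 from by norm_num] at houter
  rw [houter 0 ((rna.toList.length : Int) - 1) le_rfl (by exact_mod_cast hn) (by omega) (by omega)]
  rw [if_pos (by omega)]

@[simp] theorem solve_tabulation_raises : Claim_raises_solve_tabulation := by
  unfold Claim_raises_solve_tabulation
  exact ⟨fun rna _ hr hp => hp hr, by decide⟩
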